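-- pv_equiv track=rewrite | github.com/GMFranceschini/dataprivacy_bisulfite | BAMboozle/BAMboozle.py | parse_seq
-- ===== SOURCE A (Python) =====
-- def find_cg_positions(dna_string):
--     cg_positions = []
--     for i in range(len(dna_string) - 1):
--         if dna_string[i:i + 2].upper() == "CG":
--             cg_positions.append(i+1)
--     return cg_positions
--
-- def parse_seq(query, ref, btag):
--
--     out = []
--     cg_pos = find_cg_positions(ref)
--
--     for i, (s, r, b) in enumerate(zip(query, ref, btag)):
--         if b.upper() == "Z":
--             out.extend(s)
--         elif b == ".":
--             if i in cg_pos: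
--                 out.extend("N")
--             else:
--                 out.extend(r)
--
--     out = "".join(out)
--     return out
-- ===== SOURCE B (Python) =====
-- def parse_seq(query, ref, btag):
--     out = []
--     for i, (s, r, b) in enumerate(zip(query, ref, btag)):
--         if b.upper() == "Z":
--             out.append(s)
--         elif b == ".":
--             if i >= 1 and ref[i-1].upper() == "C" and r.upper() == "G":
--                 out.append("N")
--             else:
--                 out.append(r)
--     return "".join(out)
-- ===== Notes on version B (the rewrite author's own statement) =====
-- stated objective: simpler
-- what changed: Drops the find_cg_positions pre-pass and its per-position list membership test; a single fused pass decides CpG locally by comparing ref[i-1]/ref[i] in place.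
import Mathlib
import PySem

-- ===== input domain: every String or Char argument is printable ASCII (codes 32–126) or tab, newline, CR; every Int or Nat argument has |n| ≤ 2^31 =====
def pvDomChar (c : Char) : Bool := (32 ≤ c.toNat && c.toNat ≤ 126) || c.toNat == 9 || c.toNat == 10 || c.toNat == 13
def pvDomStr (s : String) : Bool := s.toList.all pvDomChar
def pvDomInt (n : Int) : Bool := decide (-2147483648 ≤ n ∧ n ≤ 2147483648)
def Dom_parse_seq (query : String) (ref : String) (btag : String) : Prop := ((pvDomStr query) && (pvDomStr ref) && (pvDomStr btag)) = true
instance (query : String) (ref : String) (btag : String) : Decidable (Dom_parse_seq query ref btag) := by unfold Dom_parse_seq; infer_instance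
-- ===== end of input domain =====

-- B fuses A's find_cg_positions pre-pass and membership test into one pass with a local
-- two-character CpG check; objective: simpler (same result, proved equal on the whole domain).


-- ===== PORT A =====
-- helper find_cg_positions: for i in range(len(dna)-1): if dna[i:i+2].upper()=="CG": append i+1
def find_cg_positions (dna : List Char) : List Int :=
  (PySem.List.pyRange 0 ((dna.length : Int) - 1) 1).foldl
    (fun acc i =>
      if PySem.Chars.upper (PySem.List.slice dna (some i) (some (i + 2))) = ['C', 'G']
      then acc ++ [i + 1] else acc) []

def parse_seq (query : String) (ref : String) (btag : String) : String :=
  let cg_pos := find_cg_positions ref.toList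
  let out :=
    (PySem.List.enumerate ((query.toList.zip ref.toList).zip btag.toList)).foldl
      (fun acc p =>
        let i := p.1; let s := p.2.1.1; let r := p.2.1.2; let b := p.2.2
        if PySem.Chars.upperChar b = 'Z' then acc ++ [s]
        else if b = '.' then
          if i ∈ cg_pos then acc ++ ['N'] else acc ++ [r]
        else acc) []
  String.ofList out

-- ===== PORT B =====
-- one fused pass; ref[i-1] via pyGetD (the branch guards i >= 1, so the default is never used)
def parse_seq_alt (query : String) (ref : String) (btag : String) : String :=
  let rl := ref.toList
  let out :=
    (PySem.List.enumerate ((query.toList.zip rl).zip btag.toList)).foldl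
      (fun acc p =>
        let i := p.1; let s := p.2.1.1; let r := p.2.1.2; let b := p.2.2
        if PySem.Chars.upperChar b = 'Z' then acc ++ [s]
        else if b = '.' then
          if 1 ≤ i ∧ PySem.Chars.upperChar (PySem.List.pyGetD rl (i - 1) ' ') = 'C'
               ∧ PySem.Chars.upperChar r = 'G'
          then acc ++ ['N'] else acc ++ [r]
        else acc) []
  String.ofList out

-- ===== PRECONDITION & SPEC =====
def Spec_parse_seq (query : String) (ref : String) (btag : String) (out : String) : Prop := out = parse_seq_alt query ref btag
instance (query : String) (ref : String) (btag : String) (out : String) : Decidable (Spec_parse_seq query ref btag out) := by unfold Spec_parse_seq; infer_instance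

-- ===== CLAIM (what is proved, stated in full; the proofs are below) =====
def Claim_equal_parse_seq : Prop := ∀ (query : String) (ref : String) (btag : String), Dom_parse_seq query ref btag → Spec_parse_seq query ref btag (parse_seq query ref btag)

-- ===== LEMMAS AND PROOFS =====

-- drop j of a list with j+1 < length starts with its two elements
theorem drop_two_elems {α : Type} (xs : List α) (j : Nat) (h : j + 1 < xs.length) :
    List.take 2 (List.drop j xs) = [xs[j], xs[j+1]] := by
  have h1 : List.drop j xs = xs[j] :: List.drop (j+1) xs := List.drop_eq_getElem_cons (by omega)
  have h2 : List.drop (j+1) xs = xs[j+1] :: List.drop (j+2) xs := List.drop_eq_getElem_cons h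
  rw [h1, h2]
  rfl

-- characterisation of A's CpG position list membership as B's local check
theorem mem_find_cg (rl : List Char) (k : Nat) (hk : k < rl.length) :
    ((k : Int) ∈ find_cg_positions rl) ↔
      (1 ≤ (k : Int) ∧ PySem.Chars.upperChar (PySem.List.pyGetD rl ((k : Int) - 1) ' ') = 'C'
        ∧ PySem.Chars.upperChar rl[k] = 'G') := by
  unfold find_cg_positions
  have hfun : (fun (acc : List Int) (i : Int) =>
      if PySem.Chars.upper (PySem.List.slice rl (some i) (some (i + 2))) = ['C', 'G']
      then acc ++ [i + 1] else acc)
    = (fun (acc : List Int) (i : Int) =>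
      if (decide (PySem.Chars.upper (PySem.List.slice rl (some i) (some (i + 2))) = ['C', 'G'])) = true
      then acc ++ [i + 1] else acc) := by
    funext acc i; simp
  rw [hfun, PySem.List.foldl_append_if]
  simp only [List.nil_append, List.mem_map, List.mem_filter, PySem.List.mem_pyRange_one]
  constructor
  · rintro ⟨x, ⟨⟨hx0, hx1⟩, hcg⟩, hxk⟩
    rw [decide_eq_true_eq, PySem.List.slice_toNat rl (by omega) (by omega)] at hcg
    have h2 : (x + 2).toNat - x.toNat = 2 := by omega
    have hjlt : x.toNat + 1 < rl.length := by omega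
    rw [h2, drop_two_elems rl x.toNat hjlt] at hcg
    simp only [PySem.Chars.upper, List.map_cons, List.map_nil, List.cons.injEq, and_true] at hcg
    refine ⟨by omega, ?_, ?_⟩
    · rw [PySem.List.pyGetD_of_nonneg rl ' ' (by omega)]
      have ht : ((k : Int) - 1).toNat = x.toNat := by omega
      rw [ht, List.getD_eq_getElem rl ' ' (by omega)]
      exact hcg.1
    · have he : rl[k]'hk = rl[x.toNat + 1]'hjlt := by congr 1; omega
      rw [he]; exact hcg.2
  · rintro ⟨h1, hc, hg⟩
    refine ⟨(k : Int) - 1, ⟨⟨by omega, by omega⟩, ?_⟩, by ring⟩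
    rw [decide_eq_true_eq, PySem.List.slice_toNat rl (by omega) (by omega)]
    have hj : ((k : Int) - 1).toNat = k - 1 := by omega
    have h2 : ((k : Int) - 1 + 2).toNat - ((k : Int) - 1).toNat = 2 := by omega
    rw [h2, hj, drop_two_elems rl (k - 1) (by omega)]
    simp only [PySem.Chars.upper, List.map_cons, List.map_nil, List.cons.injEq, and_true]
    refine ⟨?_, ?_⟩
    · rw [PySem.List.pyGetD_of_nonneg rl ' ' (by omega), hj,
        List.getD_eq_getElem rl ' ' (by omega)] at hc
      exact hc
    · have he : rl[k - 1 + 1]'(by omega) = rl[k]'hk := by congr 1; omega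
      rw [he]; exact hg

-- ===== VERDICT (by name: the statement is the Claim_ definition above) =====
theorem parse_seq_spec : Claim_equal_parse_seq := by
  intro query ref btag _
  unfold Spec_parse_seq parse_seq parse_seq_alt
  dsimp only
  congr 1
  apply PySem.List.foldl_congr_mem
  intro acc p hp
  rw [PySem.List.mem_enumerate_iff] at hp
  obtain ⟨k, hk, rfl⟩ := hp
  have hkr : k < ref.toList.length := by
    simp only [List.length_zip] at hk; omega
  have hkb : k < btag.toList.length := by
    simp only [List.length_zip] at hk; omega
  simp only [zero_add, List.getElem_zip]
  by_cases hz : PySem.Chars.upperChar (btag.toList[k]'hkb) = 'Z'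
  · simp [hz]
  · by_cases hd : btag.toList[k]'hkb = '.'
    · simp only [hd, mem_find_cg ref.toList k hkr]
    · simp [hz, hd]
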